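-- pv_equiv track=rewrite | github.com/alshargi/mltoolbox | mltoolbox/classify_func.py | check_bbrivation
-- ===== SOURCE A (Python) =====
-- def check_bbrivation(xstr):
--     res = False
--     pp = []
--     dk = xstr.split(" ")
--     for d in dk:
--         res = d.isupper()
--         pp.append(res)
--     if True in pp and False in pp:
--         res = True
--     return res
-- ===== SOURCE B (Python) =====
-- def check_bbrivation(xstr):
--     return any(w.isupper() for w in xstr.split(" "))
-- ===== Notes on version B (the rewrite author's own statement) =====
-- stated objective: simpler
-- what changed: A builds a boolean table of per-word isupper results, takes the leftover loop value, and scans the table twice for True/False membership; B collapses this to a single short-circuiting any() over the words, since A's value is True exactly when some word is all-uppercase.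
import Mathlib
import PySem

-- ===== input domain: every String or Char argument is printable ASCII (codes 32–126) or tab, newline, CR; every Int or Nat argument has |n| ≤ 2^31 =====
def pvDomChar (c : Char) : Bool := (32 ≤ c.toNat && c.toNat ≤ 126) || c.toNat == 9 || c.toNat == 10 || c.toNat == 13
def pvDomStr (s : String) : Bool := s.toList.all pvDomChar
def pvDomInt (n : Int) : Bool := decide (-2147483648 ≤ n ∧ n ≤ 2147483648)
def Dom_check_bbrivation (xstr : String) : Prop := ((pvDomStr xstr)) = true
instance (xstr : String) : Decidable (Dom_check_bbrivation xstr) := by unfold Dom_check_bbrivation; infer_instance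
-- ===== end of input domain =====

-- B replaces A's boolean table plus two membership scans by one short-circuiting any() over the words (simpler, same result).

-- str.isupper() for the ASCII domain: at least one cased character and no lowercase character
-- (cased ASCII characters are exactly the letters, so this is exact on Dom).
def pyStrIsupper (s : List Char) : Bool :=
  s.any PySem.Chars.isupper && s.all (fun c => !PySem.Chars.islower c)

-- ===== PORT A =====
def check_bbrivation (xstr : String) : Bool :=
  let dk := PySem.Chars.splitOn xstr.toList [' ']
  let st := dk.foldl (fun (st : Bool × List Bool) d =>
      let res := pyStrIsupper d
      (res, st.2 ++ [res])) (false, [])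
  let res := st.1
  let pp := st.2
  if pp.contains true && pp.contains false then true else res

-- ===== PORT B =====
def check_bbrivation_alt (xstr : String) : Bool :=
  (PySem.Chars.splitOn xstr.toList [' ']).any pyStrIsupper

-- ===== PRECONDITION & SPEC =====
def Spec_check_bbrivation (xstr : String) (out : Bool) : Prop := out = check_bbrivation_alt xstr
instance (xstr : String) (out : Bool) : Decidable (Spec_check_bbrivation xstr out) := by unfold Spec_check_bbrivation; infer_instance

-- ===== CLAIM (what is proved, stated in full; the proofs are below) =====
def Claim_equal_check_bbrivation : Prop := ∀ (xstr : String), Dom_check_bbrivation xstr → Spec_check_bbrivation xstr (check_bbrivation xstr)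

-- ===== LEMMAS AND PROOFS =====

-- last element (default d) of a cons
lemma pv_last_cons (a d : Bool) (l : List Bool) : (a :: l).getLast?.getD d = l.getLast?.getD a := by
  cases l with
  | nil => rfl
  | cons b l' =>
    obtain ⟨x, hx⟩ := Option.isSome_iff_exists.mp (by simp : (b :: l').getLast?.isSome)
    simp [hx]

-- the last element of a nonempty list is a member
lemma pv_last_mem (bs : List Bool) (d : Bool) (h : bs ≠ []) : bs.getLast?.getD d ∈ bs := by
  induction bs generalizing d with
  | nil => exact absurd rfl h
  | cons a l ih =>
    cases l with
    | nil => simp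
    | cons b l' =>
      rw [pv_last_cons]
      exact List.mem_cons_of_mem _ (ih a (by simp))

-- A's loop leaves res = last per-word value and pp = the full table of per-word values.
lemma pv_fold_char (ws : List (List Char)) (r0 : Bool) (acc : List Bool) :
    ws.foldl (fun (st : Bool × List Bool) d =>
      let res := pyStrIsupper d
      (res, st.2 ++ [res])) (r0, acc)
    = ((ws.map pyStrIsupper).getLast?.getD r0, acc ++ ws.map pyStrIsupper) := by
  induction ws generalizing r0 acc with
  | nil => simp
  | cons w ws ih =>
    simp only [List.foldl_cons, List.map_cons, ih, pv_last_cons]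
    simp

-- the truth table of A's final step, for any list of booleans
lemma pv_table (bs : List Bool) :
    (if bs.contains true && bs.contains false then true else bs.getLast?.getD false) = bs.any id := by
  by_cases ht : true ∈ bs
  · have hany : bs.any id = true := List.any_eq_true.mpr ⟨true, ht, rfl⟩
    by_cases hf : false ∈ bs
    · simp [List.contains_eq_mem, ht, hf, hany]
    · have hall : ∀ b ∈ bs, b = true := by
        intro b hb; cases b
        · exact absurd hb hf
        · rfl
      have hne : bs ≠ [] := by rintro rfl; simp at ht
      have hlast : bs.getLast?.getD false = true := hall _ (pv_last_mem bs false hne)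
      simp [List.contains_eq_mem, ht, hf, hany, hlast]
  · have hall : ∀ b ∈ bs, b = false := by
      intro b hb; cases b
      · rfl
      · exact absurd hb ht
    have hany : bs.any id = false := by
      rw [List.any_eq_false]; intro b hb; simpa using hall b hb
    have hlast : bs.getLast?.getD false = false := by
      cases bs with
      | nil => rfl
      | cons a l => exact hall _ (pv_last_mem (a::l) false (by simp))
    simp [List.contains_eq_mem, ht, hany, hlast]

-- ===== VERDICT (by name: the statement is the Claim_ definition above) =====
theorem check_bbrivation_spec : Claim_equal_check_bbrivation := by
  intro xstr _
  show check_bbrivation xstr = check_bbrivation_alt xstr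
  unfold check_bbrivation check_bbrivation_alt
  simp only [pv_fold_char, List.nil_append]
  rw [pv_table]
  simp [List.any_map]
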